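-- pv_equiv track=rewrite | github.com/masdevid/smartcash | smartcash/ui/components/log_accordion/log_accordion.py | _shorten_namespace
-- ===== SOURCE A (Python) =====
-- def _shorten_namespace(namespace: str) -> str:
--     """Shorten long namespace paths for better readability.
--
--     Args:
--         namespace: The full namespace to shorten
--
--     Returns:
--         A shortened, more readable version of the namespace
--     """
--     if not namespace or not isinstance(namespace, str):
--         return ""
--
--     # Common prefixes to shorten
--     replacements = [
--         ('smartcash.', ''),
--         ('smartcash.common.', 'sc.common.'),
--         ('smartcash.dataset.', 'sc.dataset.'),
--         ('smartcash.model.', 'sc.model.'),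
--         ('smartcash.ui.', 'ui.'),
--         ('smartcash.ui.core.', 'core.'),
--         ('smartcash.ui.core.shared.', 'core.'),
--         ('smartcash.ui.components.', 'components.'),
--         ('smartcash.ui.setup.', 'setup.'),
--         ('smartcash.ui.setup.colab.', 'colab.'),
--         ('smartcash.ui.setup.dependency', 'dependency.'),
--         ('smartcash.ui.dataset.', 'dataset.'),
--         ('smartcash.ui.dataset.downloader.', 'downloader.'),
--         ('smartcash.ui.dataset.preprocessing.', 'preprocessing.'),
--         ('smartcash.ui.dataset.augmentation.', 'augmentation.'),
--         ('smartcash.ui.dataset.split.', 'split.'),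
--         ('smartcash.ui.dataset.visualization.', 'visualization.'),
--         ('smartcash.ui.model.', 'model.'),
--         ('smartcash.ui.model.pretrained.', 'pretrained.'),
--         ('smartcash.ui.model.backbone.', 'backbone.'),
--         ('smartcash.ui.model.train.', 'train.'),
--         ('smartcash.ui.model.training.', 'training.'),
--         ('smartcash.ui.model.evaluate.', 'evaluate.'),
--         ('smartcash.ui.model.evaluation.', 'evaluation.'),
--     ]
--
--     # Apply replacements
--     short_ns = namespace
--     for old, new in replacements:
--         if short_ns.startswith(old):
--             short_ns = new + short_ns[len(old):]
--             # Only apply the first matching replacement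
--             break
--
--     # If no replacements were made, try to get the last part of the path
--     if short_ns == namespace and '.' in short_ns:
--         short_ns = short_ns.split('.')[-1]
--
--     return short_ns
-- ===== SOURCE B (Python) =====
-- def _shorten_namespace(namespace: str) -> str:
--     """Shorten long namespace paths for better readability.
--
--     Since every entry in A's replacement table starts with 'smartcash.' and the
--     first entry ('smartcash.', '') matches any such namespace, the table reduces
--     to plain prefix stripping; no loop or table needed.
--     """
--     if not namespace or not isinstance(namespace, str):
--         return ""
--     if namespace.startswith('smartcash.'):
--         return namespace[len('smartcash.'):]
--     if '.' in namespace: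
--         return namespace.split('.')[-1]
--     return namespace
-- ===== Notes on version B (the rewrite author's own statement) =====
-- stated objective: simpler
-- what changed: Removed the 24-entry replacement table and its loop entirely: since every table entry starts with 'smartcash.' and that first entry matches any such input, the effective behavior is plain 'smartcash.' prefix stripping, so B is a three-branch early-return chain with no table or loop.
import Mathlib
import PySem

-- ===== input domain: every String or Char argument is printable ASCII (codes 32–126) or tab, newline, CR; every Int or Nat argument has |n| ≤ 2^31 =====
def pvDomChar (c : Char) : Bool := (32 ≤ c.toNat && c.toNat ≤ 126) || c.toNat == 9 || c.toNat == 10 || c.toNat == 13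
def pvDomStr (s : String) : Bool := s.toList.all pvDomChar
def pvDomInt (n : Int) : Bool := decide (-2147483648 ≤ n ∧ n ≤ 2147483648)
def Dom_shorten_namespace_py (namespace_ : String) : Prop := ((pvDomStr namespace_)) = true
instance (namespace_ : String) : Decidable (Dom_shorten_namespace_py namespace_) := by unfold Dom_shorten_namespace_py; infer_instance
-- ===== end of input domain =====

-- B removes A's 24-entry replacement table and loop (their first entry already matches every
-- 'smartcash.'-prefixed input), leaving a plain three-branch prefix-strip / last-segment chain.

-- ===== PORT A =====
-- the replacements table, verbatim
def pvReplacements : List (String × String) :=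
  [ ("smartcash.", ""),
    ("smartcash.common.", "sc.common."),
    ("smartcash.dataset.", "sc.dataset."),
    ("smartcash.model.", "sc.model."),
    ("smartcash.ui.", "ui."),
    ("smartcash.ui.core.", "core."),
    ("smartcash.ui.core.shared.", "core."),
    ("smartcash.ui.components.", "components."),
    ("smartcash.ui.setup.", "setup."),
    ("smartcash.ui.setup.colab.", "colab."),
    ("smartcash.ui.setup.dependency", "dependency."),
    ("smartcash.ui.dataset.", "dataset."),
    ("smartcash.ui.dataset.downloader.", "downloader."),
    ("smartcash.ui.dataset.preprocessing.", "preprocessing."),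
    ("smartcash.ui.dataset.augmentation.", "augmentation."),
    ("smartcash.ui.dataset.split.", "split."),
    ("smartcash.ui.dataset.visualization.", "visualization."),
    ("smartcash.ui.model.", "model."),
    ("smartcash.ui.model.pretrained.", "pretrained."),
    ("smartcash.ui.model.backbone.", "backbone."),
    ("smartcash.ui.model.train.", "train."),
    ("smartcash.ui.model.training.", "training."),
    ("smartcash.ui.model.evaluate.", "evaluate."),
    ("smartcash.ui.model.evaluation.", "evaluation.") ]

-- the for-loop with break: first matching entry applies, rest are skipped
def pvApplyRepl : List (String × String) → String → String
  | [], s => s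
  | (old, new) :: rest, s =>
    if PySem.Str.startswith s old then new ++ PySem.Str.slice s (some (PySem.Str.len old)) none
    else pvApplyRepl rest s

def shorten_namespace_py (namespace_ : String) : String :=
  if namespace_ == "" then ""           -- `not namespace` (isinstance check is always true for str)
  else
    let short_ns := pvApplyRepl pvReplacements namespace_
    if short_ns == namespace_ && PySem.Str.isIn "." short_ns then
      -- short_ns.split('.')[-1]; split? with nonempty sep is always some, the list nonempty
      (PySem.List.pyGet? ((PySem.Str.split? short_ns ".").getD []) (-1)).getD ""
    else short_ns

-- ===== PORT B =====
def shorten_namespace_py_alt (namespace_ : String) : String :=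
  if namespace_ == "" then ""
  else if PySem.Str.startswith namespace_ "smartcash." then
    PySem.Str.slice namespace_ (some (PySem.Str.len "smartcash.")) none
  else if PySem.Str.isIn "." namespace_ then
    (PySem.List.pyGet? ((PySem.Str.split? namespace_ ".").getD []) (-1)).getD ""
  else namespace_

-- ===== PRECONDITION & SPEC =====
def Spec_shorten_namespace_py (namespace_ : String) (out : String) : Prop := out = shorten_namespace_py_alt namespace_
instance (namespace_ : String) (out : String) : Decidable (Spec_shorten_namespace_py namespace_ out) := by unfold Spec_shorten_namespace_py; infer_instance

-- ===== CLAIM (what is proved, stated in full; the proofs are below) =====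
def Claim_equal_shorten_namespace_py : Prop := ∀ (namespace_ : String), Dom_shorten_namespace_py namespace_ → Spec_shorten_namespace_py namespace_ (shorten_namespace_py namespace_)

-- ===== LEMMAS AND PROOFS =====

-- if s starts with "smartcash.", the loop stops at the first entry
lemma applyRepl_of_prefix (s : String) (h : PySem.Str.startswith s "smartcash." = true) :
    pvApplyRepl pvReplacements s = PySem.Str.slice s (some (PySem.Str.len "smartcash.")) none := by
  simp only [pvReplacements, pvApplyRepl]
  rw [h]
  simp

-- every other entry of the table extends "smartcash.", so no entry matches when that prefix is absent
lemma applyRepl_of_no_prefix (s : String) (h : PySem.Str.startswith s "smartcash." = false) :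
    pvApplyRepl pvReplacements s = s := by
  have key : ∀ old : String, ("smartcash.".toList <+: old.toList) →
      PySem.Str.startswith s old = false := by
    intro old hpre
    by_contra hne
    have hst : PySem.Str.startswith s old = true := by
      cases hx : PySem.Str.startswith s old with
      | false => exact absurd hx hne
      | true => rfl
    rw [PySem.Str.startswith_eq, PySem.Chars.startswith_iff] at hst
    have h3 : PySem.Str.startswith s "smartcash." = true := by
      rw [PySem.Str.startswith_eq, PySem.Chars.startswith_iff]
      exact hpre.trans hst
    rw [h] at h3
    exact Bool.false_ne_true h3
  simp only [pvReplacements, pvApplyRepl]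
  rw [h]
  repeat rw [key _ (by decide)]
  simp

-- stripping the 10-character prefix makes the string strictly shorter, so never equal to s
lemma slice_ne_self (s : String) (h : PySem.Str.startswith s "smartcash." = true) :
    (PySem.Str.slice s (some (PySem.Str.len "smartcash.")) none == s) = false := by
  rw [beq_eq_false_iff_ne]
  intro heq
  have hlist : (PySem.Str.slice s (some (PySem.Str.len "smartcash.")) none).toList = s.toList :=
    congrArg String.toList heq
  rw [PySem.Str.toList_slice] at hlist
  have hlen10 : PySem.Str.len "smartcash." = (10 : Int) := by decide
  rw [hlen10] at hlist
  have : PySem.Chars.slice s.toList (some (10:Int)) none = s.toList.drop 10 := by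
    rw [PySem.Chars.slice_eq_listSlice]
    exact_mod_cast PySem.List.slice_from_natCast s.toList 10
  rw [this] at hlist
  rw [PySem.Str.startswith_eq, PySem.Chars.startswith_iff] at h
  have hge : 10 ≤ s.toList.length := by
    have := h.length_le
    simpa using this
  have hlenEq := congrArg List.length hlist
  rw [List.length_drop] at hlenEq
  omega

-- ===== VERDICT (by name: the statement is the Claim_ definition above) =====
theorem shorten_namespace_py_spec : Claim_equal_shorten_namespace_py := by
  intro s _
  unfold Spec_shorten_namespace_py shorten_namespace_py shorten_namespace_py_alt
  by_cases h0 : s = ""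
  · simp [h0]
  · have h0' : (s == "") = false := by simpa [beq_eq_false_iff_ne] using h0
    rw [h0']
    simp only [Bool.false_eq_true, if_false]
    cases hp : PySem.Str.startswith s "smartcash." with
    | true =>
      rw [applyRepl_of_prefix s hp, slice_ne_self s hp]
      simp
    | false =>
      rw [applyRepl_of_no_prefix s hp]
      simp only [beq_self_eq_true, Bool.true_and]
      cases hd : PySem.Str.isIn "." s <;> simp
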